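-- pv_equiv track=rewrite | github.com/SedatCeyhan/Algorithms_Solutions | Akuna Capital/PrimeString.py | splitIntoPrimes
-- ===== SOURCE A (Python) =====
-- def getPrimesFromSeive(primes):
--     prime = [True] * (1000001)
--     prime[0], prime[1] = False, False
--     i = 2
--     while (i * i <= 1000000):
--         if (prime[i] == True):
--             for j in range(i * i, 1000001, i):
--                 prime[j] = False
--         i += 1
--
--     # Here str() is used for
--     # converting int to string
--     for i in range(2, 1000001):
--         if (prime[i] == True):
--             primes.append(str(i))
--
-- def splitIntoPrimes(number):
--     n = len(number)
--
--     # Declare a splitdp[] array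
--     # and initialize to 0
--     splitDP = [0] * (n + 1)
--
--     # Call sieve function to store
--     # primes in primes array
--     primes = []
--     getPrimesFromSeive(primes)
--
--     # Build the DP table in a bottom-up manner
--     for i in range(1, n + 1):
--
--         # If the prefix is prime then the prefix
--         # will be found in the prime set
--         if (i <= 6 and number[:i] in primes):
--             splitDP[i] = 1
--
--         # If the Given Prefix can be split into Primes
--         # then for the remaining string from i to j
--         # Check if Prime. If yes calculate
--         # the minimum split till j
--         if (splitDP[i] != 0):
--             j = 1
--             while j <= 6 and i + j <= n:
--
--                 # To check if the substring from i to j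
--                 # is a prime number or not
--                 if number[i : i + j] in primes:
--
--                     # If it is a prime, then
--                     # update the dp array
--                     if splitDP[i + j] == 0:
--                         splitDP[i + j] = 1 + splitDP[i]
--                     else:
--                         splitDP[i + j] = min(splitDP[i + j],
--                                              1 + splitDP[i])
--
--                 j += 1
--
--     # Return the minimum number of
--     # splits for the entire string
--     #return splitDP[n]
--     return ((splitDP[n]))
-- ===== SOURCE B (Python) =====
-- def getPrimesFromSeive(primes):
--     prime = [True] * (1000001)
--     prime[0], prime[1] = False, False
--     i = 2
--     while (i * i <= 1000000):
--         if (prime[i] == True):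
--             for j in range(i * i, 1000001, i):
--                 prime[j] = False
--         i += 1
--     for i in range(2, 1000001):
--         if (prime[i] == True):
--             primes.append(str(i))
--
--
-- def splitIntoPrimes(number):
--     primes = []
--     getPrimesFromSeive(primes)
--     n = len(number)
--     # breadth-first search by levels over positions 0..n: frontier holds the positions first
--     # reached with exactly k-1 prime pieces; the first level whose expansion reaches n is the
--     # minimum number of pieces, and exhausting the levels without reaching n means unsplittable.
--     visited = {0}
--     frontier = {0}
--     for k in range(1, n + 1):
--         nxt = set()
--         for i in frontier:
--             for j in range(1, 7):
--                 t = i + j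
--                 if t <= n and t not in visited and number[i:t] in primes:
--                     nxt.add(t)
--         if n in nxt:
--             return k
--         visited |= nxt
--         frontier = nxt
--     return 0
-- ===== Notes on version B (the rewrite author's own statement) =====
-- stated objective: alternative
-- what changed: B keeps the same sieve-built prime list but replaces A's bottom-up DP table (0-sentinel, gated min-updates over all prefixes) by a breadth-first search by levels over string positions: frontier/visited sets, no dp array and no min computations, returning the first level that reaches position n.
import Mathlib
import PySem

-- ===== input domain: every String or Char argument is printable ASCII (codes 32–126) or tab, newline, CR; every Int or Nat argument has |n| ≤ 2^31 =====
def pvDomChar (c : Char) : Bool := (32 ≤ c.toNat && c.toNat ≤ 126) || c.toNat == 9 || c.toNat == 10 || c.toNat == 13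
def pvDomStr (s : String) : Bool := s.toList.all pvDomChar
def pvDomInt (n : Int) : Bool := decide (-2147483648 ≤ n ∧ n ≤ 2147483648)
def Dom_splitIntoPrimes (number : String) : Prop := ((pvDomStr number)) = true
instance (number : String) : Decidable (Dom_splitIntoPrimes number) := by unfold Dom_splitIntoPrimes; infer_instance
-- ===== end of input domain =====

-- B replaces A's bottom-up DP table by a breadth-first search by levels over positions
-- (frontier/visited sets, no dp array, early return at the level reaching n); same sieve-built
-- prime list ("alternative" objective, not claimed faster).
-- Python's getPrimesFromSeive mutates its list argument; both ports take the RETURNED value view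
-- (the caller passes a fresh [] in A; B's helper returns its set), so no observable difference.


-- ===== PORT A =====
-- getPrimesFromSeive mutates its (empty) Python list argument; ported as returning that list.
-- The 10^6-entry Python bool list is an Array (all index assignments are in range, so set!/get!
-- are exact); each while loop is the recursion/fold below, step for step.
def pvSieveMarkA (i : Nat) (prime : Array Bool) : Array Bool :=
  (PySem.List.pyRange ((i : Int) * i) 1000001 i).foldl
    (fun a j => a.set! j.toNat false) prime

def pvSieveLoopA (i : Nat) (prime : Array Bool) : Array Bool :=
  if i * i ≤ 1000000 then
    pvSieveLoopA (i + 1) (if prime[i]! = true then pvSieveMarkA i prime else prime)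
  else prime
termination_by 1001 - i
decreasing_by
  rename_i h
  have h2 : i ≤ 1000 := by nlinarith
  omega

def getPrimesFromSeive : List String :=
  let prime := ((Array.replicate 1000001 true).set! 0 false).set! 1 false
  let prime := pvSieveLoopA 2 prime
  -- the append loop 'primes.append(str(i))' is an Array push (O(1), like Python's append)
  ((PySem.List.pyRange 2 1000001 1).foldl
    (fun acc i => if prime[i.toNat]! = true then acc.push (PySem.Int.toStr i) else acc)
    (#[] : Array String)).toList

-- the inner 'while j <= 6 and i + j <= n' loop of A
def pvAInner (cs : List Char) (n : Nat) (primes : List String) (i : Nat)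
    (dp : List Int) (j : Nat) : List Int :=
  if j ≤ 6 ∧ i + j ≤ n then
    pvAInner cs n primes i
      (if primes.contains (String.ofList ((cs.drop i).take j)) = true then
        (if dp.getD (i + j) 0 = 0 then dp.set (i + j) (1 + dp.getD i 0)
         else dp.set (i + j) (min (dp.getD (i + j) 0) (1 + dp.getD i 0)))
      else dp) (j + 1)
  else dp
termination_by 7 - j

-- the body of A's 'for i in range(1, n+1)' loop (i = i0 + 1)
def pvAStep (cs : List Char) (n : Nat) (primes : List String)
    (dp : List Int) (i0 : Nat) : List Int :=
  let i := i0 + 1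
  let dp1 := if i ≤ 6 ∧ primes.contains (String.ofList (cs.take i)) = true
             then dp.set i 1 else dp
  if dp1.getD i 0 ≠ 0 then pvAInner cs n primes i dp1 1 else dp1

def splitIntoPrimes (number : String) : Int :=
  let cs := number.toList
  let n := cs.length
  let primes := getPrimesFromSeive
  let dp := (List.range n).foldl (pvAStep cs n primes) (List.replicate (n + 1) (0 : Int))
  dp.getD n 0

-- ===== PORT B =====
-- Source B's getPrimesFromSeive is character-for-character A's helper (the hint keeps the same
-- sieve); it is ported once above and shared, so B's port reuses `getPrimesFromSeive`.

-- one BFS level: nxt = unvisited positions reachable from the frontier by one prime piece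
def pvBNext (cs : List Char) (n : Nat) (primes : List String)
    (visited frontier : PySem.Set Nat) : PySem.Set Nat :=
  frontier.foldl (fun nxt i =>
    (List.range 6).foldl (fun nxt j0 =>
      if i + (j0 + 1) ≤ n ∧ visited.contains (i + (j0 + 1)) = false ∧
         primes.contains (String.ofList ((cs.drop i).take (j0 + 1))) = true
      then PySem.Set.add nxt (i + (j0 + 1)) else nxt) nxt)
    (PySem.Set.empty : PySem.Set Nat)

-- the 'for k in range(1, n+1)' loop with its early 'return k'
def pvBLoop (cs : List Char) (n : Nat) (primes : List String)
    (visited frontier : PySem.Set Nat) (k : Nat) : Int :=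
  if h : k ≤ n then
    let nxt := pvBNext cs n primes visited frontier
    if nxt.contains n then (k : Int)
    else pvBLoop cs n primes (PySem.Set.union visited nxt) nxt (k + 1)
  else 0
termination_by n + 1 - k
decreasing_by omega

def splitIntoPrimes_alt (number : String) : Int :=
  let primes := getPrimesFromSeive
  let cs := number.toList
  let n := cs.length
  pvBLoop cs n primes (PySem.Set.ofList [0]) (PySem.Set.ofList [0]) 1

-- ===== PRECONDITION & SPEC =====
def Spec_splitIntoPrimes (number : String) (out : Int) : Prop := out = splitIntoPrimes_alt number
instance (number : String) (out : Int) : Decidable (Spec_splitIntoPrimes number out) := by unfold Spec_splitIntoPrimes; infer_instance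

-- ===== CLAIM (what is proved, stated in full; the proofs are below) =====
def Claim_equal_splitIntoPrimes : Prop := ∀ (number : String), Dom_splitIntoPrimes number → Spec_splitIntoPrimes number (splitIntoPrimes number)

-- ===== LEMMAS AND PROOFS =====

-- getD after set, in bounds
theorem pvGetD_set {α : Type} (l : List α) (i k : Nat) (v d : α) (h : i < l.length) :
    (l.set i v).getD k d = if k = i then v else l.getD k d := by
  simp [List.getD_eq_getElem?_getD, List.getElem?_set]
  split <;> rename_i hk
  · subst hk; simp
  · split <;> simp_all [eq_comm]

-- the membership test both programs perform on the piece cs[a : a+j]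
def pvOk (primes : List String) (cs : List Char) (a j : Nat) : Bool :=
  primes.contains (String.ofList ((cs.drop a).take j))

-- the common specification: minimal number of prime pieces (of length 1..6) covering cs[:i]
def pvF (ok : Nat → Nat → Bool) : Nat → Option Int
  | 0 => some 0
  | (i + 1) => PySem.List.min? ((List.range (min 6 (i + 1))).filterMap (fun j0 =>
      match pvF ok (i + 1 - (j0 + 1)) with
      | some m => if ok (i + 1 - (j0 + 1)) (j0 + 1) then some (m + 1) else none
      | none => none)) (fun x => x)
decreasing_by omega

def pvCandsList (ok : Nat → Nat → Bool) (i : Nat) : List Int :=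
  (List.range (min 6 i)).filterMap (fun j0 =>
    match pvF ok (i - (j0 + 1)) with
    | some m => if ok (i - (j0 + 1)) (j0 + 1) then some (m + 1) else none
    | none => none)

theorem pvF_succ (ok : Nat → Nat → Bool) (i : Nat) :
    pvF ok (i + 1) = PySem.List.min? (pvCandsList ok (i + 1)) (fun x => x) := by
  rw [pvF]; rfl

theorem pvF_zero (ok : Nat → Nat → Bool) : pvF ok 0 = some 0 := by simp [pvF]

-- x is a candidate value for position i (a piece of length j ending at i, rest coverable)
def pvCand (ok : Nat → Nat → Bool) (i : Nat) (x : Int) : Prop :=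
  ∃ j m, 1 ≤ j ∧ j ≤ 6 ∧ j ≤ i ∧ pvF ok (i - j) = some m ∧ ok (i - j) j = true ∧ x = m + 1

-- candidate values for k that A's loop has already pushed after processing sources 1..t
def pvPCand (ok : Nat → Nat → Bool) (t k : Nat) (x : Int) : Prop :=
  ∃ j m, 1 ≤ j ∧ j ≤ 6 ∧ j < k ∧ k - j ≤ t ∧ pvF ok (k - j) = some m ∧ ok (k - j) j = true ∧
    x = m + 1

-- v is A's 0-sentinel encoding of the minimum of the values satisfying P
def pvMME (v : Int) (P : Int → Prop) : Prop :=
  (v = 0 → ∀ x, ¬ P x) ∧ (v ≠ 0 → P v ∧ ∀ x, P x → v ≤ x)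

theorem pvMME_congr (v : Int) (P Q : Int → Prop) (hPQ : ∀ x, P x ↔ Q x) (h : pvMME v P) :
    pvMME v Q := by
  refine ⟨fun hv x hx => h.1 hv x ((hPQ x).mpr hx), fun hv => ?_⟩
  exact ⟨(hPQ v).mp (h.2 hv).1, fun x hx => (h.2 hv).2 x ((hPQ x).mpr hx)⟩

theorem pvMem_candsList (ok : Nat → Nat → Bool) (i : Nat) (x : Int) :
    x ∈ pvCandsList ok i ↔ pvCand ok i x := by
  unfold pvCandsList pvCand
  rw [List.mem_filterMap]
  constructor
  · rintro ⟨j0, hj0, hf⟩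
    rw [List.mem_range] at hj0
    rcases hF : pvF ok (i - (j0 + 1)) with _ | m
    · simp [hF] at hf
    · rcases hok : ok (i - (j0 + 1)) (j0 + 1) with _ | _
      · simp [hF, hok] at hf
      · simp [hF, hok] at hf
        exact ⟨j0 + 1, m, by omega, by omega, by omega, hF, hok, hf.symm⟩
  · rintro ⟨j, m, h1, h6, hji, hF, hok, hx⟩
    refine ⟨j - 1, by rw [List.mem_range]; omega, ?_⟩
    have hj : j - 1 + 1 = j := by omega
    rw [hj, hF, hok]
    simp [hx]

theorem pvF_pos (ok : Nat → Nat → Bool) (i : Nat) (m : Int) (h : pvF ok i = some m) :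
    0 ≤ m ∧ (1 ≤ i → 1 ≤ m) := by
  induction i using Nat.strong_induction_on generalizing m with
  | _ i IH =>
    match i with
    | 0 =>
      simp [pvF] at h
      omega
    | i + 1 =>
      rw [pvF_succ] at h
      have hm := PySem.List.min?_mem h
      rw [pvMem_candsList] at hm
      obtain ⟨j, m', h1, h6, hji, hF, hok, hx⟩ := hm
      have := IH (i + 1 - j) (by omega) m' hF
      exact ⟨by omega, fun _ => by omega⟩

-- each piece covers at least one character, so the count is at most the length
theorem pvF_le (ok : Nat → Nat → Bool) (i : Nat) (m : Int) (h : pvF ok i = some m) :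
    m ≤ (i : Int) := by
  induction i using Nat.strong_induction_on generalizing m with
  | _ i IH =>
    match i with
    | 0 =>
      simp [pvF] at h
      omega
    | i + 1 =>
      rw [pvF_succ] at h
      have hm := PySem.List.min?_mem h
      rw [pvMem_candsList] at hm
      obtain ⟨j, m', h1, h6, hji, hF, hok, hx⟩ := hm
      have := IH (i + 1 - j) (by omega) m' hF
      have : (↑(i + 1 - j) : Int) ≤ (i : Int) := by
        omega
      omega

theorem pvCand_ge_one (ok : Nat → Nat → Bool) (i : Nat) (x : Int) (h : pvCand ok i x) :
    1 ≤ x := by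
  obtain ⟨j, m, h1, h6, hji, hF, hok, hx⟩ := h
  have := pvF_pos ok (i - j) m hF
  omega

theorem pvPCand_ge_two (ok : Nat → Nat → Bool) (t k : Nat) (x : Int) (h : pvPCand ok t k x) :
    2 ≤ x := by
  obtain ⟨j, m, h1, h6, hjk, hkt, hF, hok, hx⟩ := h
  have hp := pvF_pos ok (k - j) m hF
  have := hp.2 (by omega)
  omega

theorem pvF_none_iff (ok : Nat → Nat → Bool) (i : Nat) (hi : 1 ≤ i) :
    pvF ok i = none ↔ ∀ x, ¬ pvCand ok i x := by
  match i with
  | i + 1 =>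
    rw [pvF_succ, PySem.List.min?_eq_none_iff]
    constructor
    · intro h x hc
      rw [← pvMem_candsList ok (i + 1) x] at hc
      simp [h] at hc
    · intro h
      rcases hl : pvCandsList ok (i + 1) with _ | ⟨y, ys⟩
      · rfl
      · exact absurd ((pvMem_candsList ok (i + 1) y).mp (by rw [hl]; exact List.mem_cons_self))
          (h y)

theorem pvF_some (ok : Nat → Nat → Bool) (i : Nat) (m : Int) (hi : 1 ≤ i)
    (h : pvF ok i = some m) : pvCand ok i m ∧ ∀ x, pvCand ok i x → m ≤ x := by
  match i with
  | i + 1 =>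
    rw [pvF_succ] at h
    refine ⟨(pvMem_candsList ok (i + 1) m).mp (PySem.List.min?_mem h), ?_⟩
    intro x hx
    have := PySem.List.min?_isMin h x ((pvMem_candsList ok (i + 1) x).mpr hx)
    simpa using this

-- the 0-sentinel encoding determines the value
theorem pvMME_eq_encF (ok : Nat → Nat → Bool) (i : Nat) (v : Int) (hi : 1 ≤ i)
    (h : pvMME v (pvCand ok i)) : v = (pvF ok i).getD 0 := by
  rcases hF : pvF ok i with _ | m
  · rw [pvF_none_iff ok i hi] at hF
    by_cases hv : v = 0
    · simp [hv]
    · exact absurd (h.2 hv).1 (hF v)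
  · have hs := pvF_some ok i m hi hF
    by_cases hv : v = 0
    · exact absurd hs.1 (h.1 hv m)
    · have h1 := (h.2 hv).2 m hs.1
      have h2 := hs.2 v (h.2 hv).1
      simp
      omega

-- pushed candidates vs. the full candidate set: the only extra source is 0 (the prefix branch)
theorem pvCand_iff_pCand (ok : Nat → Nat → Bool) (k : Nat) (hk : 1 ≤ k) (x : Int) :
    pvCand ok k x ↔ pvPCand ok (k - 1) k x ∨ (k ≤ 6 ∧ ok 0 k = true ∧ x = 1) := by
  unfold pvCand pvPCand
  constructor
  · rintro ⟨j, m, h1, h6, hji, hF, hok, hx⟩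
    by_cases hj : j = k
    · right
      subst hj
      simp only [Nat.sub_self] at hF hok
      simp [pvF] at hF
      exact ⟨h6, by simpa using hok, by omega⟩
    · left
      exact ⟨j, m, h1, h6, by omega, by omega, hF, hok, hx⟩
  · rintro (⟨j, m, h1, h6, hjk, hkt, hF, hok, hx⟩ | ⟨h6, hok, hx⟩)
    · exact ⟨j, m, h1, h6, by omega, hF, hok, hx⟩
    · refine ⟨k, 0, hk, h6, le_refl k, ?_, ?_, by omega⟩
      · simp [pvF]
      · simpa using hok

-- adding source t+1 to the pushed set
theorem pvPCand_succ_iff (ok : Nat → Nat → Bool) (t k : Nat) (x : Int) (h : t + 1 < k) :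
    pvPCand ok (t + 1) k x ↔ pvPCand ok t k x ∨
      (∃ m, k - (t + 1) ≤ 6 ∧ pvF ok (t + 1) = some m ∧ ok (t + 1) (k - (t + 1)) = true ∧
        x = m + 1) := by
  unfold pvPCand
  constructor
  · rintro ⟨j, m, h1, h6, hjk, hkt, hF, hok, hx⟩
    by_cases hj : k - j = t + 1
    · right
      have hjv : j = k - (t + 1) := by omega
      subst hjv
      rw [hj] at hF hok
      exact ⟨m, by omega, hF, hok, hx⟩
    · left
      exact ⟨j, m, h1, h6, hjk, by omega, hF, hok, hx⟩
  · rintro (⟨j, m, h1, h6, hjk, hkt, hF, hok, hx⟩ | ⟨m, h6, hF, hok, hx⟩)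
    · exact ⟨j, m, h1, h6, hjk, by omega, hF, hok, hx⟩
    · have hkk : k - (k - (t + 1)) = t + 1 := by omega
      refine ⟨k - (t + 1), m, by omega, h6, by omega, by omega, ?_, ?_, hx⟩
      · rw [hkk]; exact hF
      · rw [hkk]; exact hok

-- A's loop invariant after processing i = 1..t
def pvInvA (ok : Nat → Nat → Bool) (n t : Nat) (dp : List Int) : Prop :=
  dp.length = n + 1 ∧
  (∀ k, k ≤ t → k ≤ n → dp.getD k 0 = (pvF ok k).getD 0) ∧
  (∀ k, t < k → k ≤ n → pvMME (dp.getD k 0) (pvPCand ok t k))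

-- at loop exit every pending entry keeps its "sources ≤ i-1" description, which for pieces
-- longer than 6 (or past n) is the same as "sources ≤ i"
theorem pvAExit (ok : Nat → Nat → Bool) (n i j : Nat) (dp : List Int)
    (hi : 1 ≤ i) (hc : ¬(j ≤ 6 ∧ i + j ≤ n))
    (hlen : dp.length = n + 1)
    (h3 : ∀ k, k ≤ i → k ≤ n → dp.getD k 0 = (pvF ok k).getD 0)
    (h4 : ∀ k, i < k → k ≤ n → k < i + j → pvMME (dp.getD k 0) (pvPCand ok i k))
    (h5 : ∀ k, i < k → k ≤ n → i + j ≤ k → pvMME (dp.getD k 0) (pvPCand ok (i - 1) k)) :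
    pvInvA ok n i dp := by
  refine ⟨hlen, h3, ?_⟩
  intro k hik hkn
  by_cases hkj : k < i + j
  · exact h4 k hik hkn hkj
  · have hj7 : 7 ≤ j := by
      by_contra hj
      exact hc ⟨by omega, by omega⟩
    apply pvMME_congr _ _ _ _ (h5 k hik hkn (by omega))
    intro x
    have hii : i - 1 + 1 = i := by omega
    have hiff := pvPCand_succ_iff ok (i - 1) k x (by omega)
    rw [hii] at hiff
    constructor
    · exact fun hx => hiff.mpr (Or.inl hx)
    · intro hq
      rcases hiff.mp hq with hx | ⟨m, h6, _, _, _⟩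
      · exact hx
      · omega

theorem pvAInner_inv (cs : List Char) (n : Nat) (primes : List String) (i : Nat)
    (mi : Int) (hi : 1 ≤ i) (hin : i ≤ n)
    (hfi : pvF (pvOk primes cs) i = some mi) :
    ∀ j dp, 1 ≤ j →
      dp.length = n + 1 →
      (∀ k, k ≤ i → k ≤ n → dp.getD k 0 = (pvF (pvOk primes cs) k).getD 0) →
      (∀ k, i < k → k ≤ n → k < i + j → pvMME (dp.getD k 0) (pvPCand (pvOk primes cs) i k)) →
      (∀ k, i < k → k ≤ n → i + j ≤ k → pvMME (dp.getD k 0) (pvPCand (pvOk primes cs) (i - 1) k)) →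
      pvInvA (pvOk primes cs) n i (pvAInner cs n primes i dp j) := by
  have hmi1 : 1 ≤ mi := (pvF_pos _ i mi hfi).2 hi
  suffices H : ∀ fuel j dp, 7 - j ≤ fuel → 1 ≤ j →
      dp.length = n + 1 →
      (∀ k, k ≤ i → k ≤ n → dp.getD k 0 = (pvF (pvOk primes cs) k).getD 0) →
      (∀ k, i < k → k ≤ n → k < i + j → pvMME (dp.getD k 0) (pvPCand (pvOk primes cs) i k)) →
      (∀ k, i < k → k ≤ n → i + j ≤ k → pvMME (dp.getD k 0) (pvPCand (pvOk primes cs) (i - 1) k)) →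
      pvInvA (pvOk primes cs) n i (pvAInner cs n primes i dp j) by
    intro j dp
    exact H 7 j dp (by omega)
  intro fuel
  induction fuel with
  | zero =>
    intro j dp hfu h1 hlen h3 h4 h5
    rw [pvAInner, if_neg (by omega)]
    exact pvAExit _ n i j dp hi (by omega) hlen h3 h4 h5
  | succ fuel IH =>
    intro j dp hfu h1 hlen h3 h4 h5
    rw [pvAInner]
    by_cases hc : j ≤ 6 ∧ i + j ≤ n
    · rw [if_pos hc]
      have hdpi : dp.getD i 0 = mi := by
        rw [h3 i (le_refl _) hin, hfi]
        rfl
      have hold := h5 (i + j) (by omega) hc.2 (le_refl _)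
      have hii : i - 1 + 1 = i := by omega
      -- the pushed-candidate set for i+j after this step
      have hiff : ∀ x, pvPCand (pvOk primes cs) i (i + j) x ↔
          pvPCand (pvOk primes cs) (i - 1) (i + j) x ∨
          (pvOk primes cs i j = true ∧ x = mi + 1) := by
        intro x
        have hf := pvPCand_succ_iff (pvOk primes cs) (i - 1) (i + j) x (by omega)
        rw [hii] at hf
        have hji : i + j - i = j := by omega
        rw [hji] at hf
        rw [hf]
        constructor
        · rintro (hx | ⟨m, h6, hFm, hokm, hxm⟩)
          · exact Or.inl hx
          · rw [hfi] at hFm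
            exact Or.inr ⟨hokm, by cases hFm; exact hxm⟩
        · rintro (hx | ⟨hokm, hxm⟩)
          · exact Or.inl hx
          · exact Or.inr ⟨mi, hc.1, hfi, hokm, hxm⟩
      -- the updated entry at i+j
      have hmid : pvMME ((if primes.contains (String.ofList ((cs.drop i).take j)) = true then
            (if dp.getD (i + j) 0 = 0 then dp.set (i + j) (1 + dp.getD i 0)
             else dp.set (i + j) (min (dp.getD (i + j) 0) (1 + dp.getD i 0)))
          else dp).getD (i + j) 0) (pvPCand (pvOk primes cs) i (i + j)) := by
        by_cases hok : primes.contains (String.ofList ((cs.drop i).take j)) = true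
        · have hok' : pvOk primes cs i j = true := hok
          rw [if_pos hok]
          by_cases hz : dp.getD (i + j) 0 = 0
          · rw [if_pos hz, pvGetD_set _ _ _ _ _ (by omega), if_pos rfl, hdpi]
            refine ⟨fun h0 => absurd h0 (by omega), fun _ => ⟨?_, ?_⟩⟩
            · exact (hiff _).mpr (Or.inr ⟨hok', by omega⟩)
            · intro x hx
              rcases (hiff x).mp hx with hx' | ⟨_, hxm⟩
              · exact absurd hx' (hold.1 hz x)
              · omega
          · rw [if_neg hz, pvGetD_set _ _ _ _ _ (by omega), if_pos rfl, hdpi]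
            have hv := hold.2 hz
            have hv2 : 2 ≤ dp.getD (i + j) 0 := pvPCand_ge_two _ _ _ _ hv.1
            refine ⟨fun h0 => absurd h0 (by omega), fun _ => ⟨?_, ?_⟩⟩
            · rcases le_total (dp.getD (i + j) 0) (1 + mi) with hle | hle
              · rw [min_eq_left hle]
                exact (hiff _).mpr (Or.inl hv.1)
              · rw [min_eq_right hle]
                exact (hiff _).mpr (Or.inr ⟨hok', by omega⟩)
            · intro x hx
              rcases (hiff x).mp hx with hx' | ⟨_, hxm⟩
              · exact le_trans (min_le_left _ _) (hv.2 x hx')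
              · have := min_le_right (dp.getD (i + j) 0) (1 + mi)
                omega
        · rw [if_neg hok]
          apply pvMME_congr _ _ _ _ hold
          intro x
          rw [hiff x]
          constructor
          · exact Or.inl
          · rintro (hx | ⟨hokm, _⟩)
            · exact hx
            · exact absurd hokm (by simpa [pvOk] using hok)
      -- entries other than i+j are untouched
      have hne : ∀ k, k ≠ i + j →
          (if primes.contains (String.ofList ((cs.drop i).take j)) = true then
            (if dp.getD (i + j) 0 = 0 then dp.set (i + j) (1 + dp.getD i 0)
             else dp.set (i + j) (min (dp.getD (i + j) 0) (1 + dp.getD i 0)))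
          else dp).getD k 0 = dp.getD k 0 := by
        intro k hk
        split_ifs
        · rw [pvGetD_set _ _ _ _ _ (by omega), if_neg hk]
        · rw [pvGetD_set _ _ _ _ _ (by omega), if_neg hk]
        · rfl
      have hlen' : (if primes.contains (String.ofList ((cs.drop i).take j)) = true then
            (if dp.getD (i + j) 0 = 0 then dp.set (i + j) (1 + dp.getD i 0)
             else dp.set (i + j) (min (dp.getD (i + j) 0) (1 + dp.getD i 0)))
          else dp).length = n + 1 := by
        split_ifs <;> simp [List.length_set, hlen]
      apply IH (j + 1) _ (by omega) (by omega) hlen'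
      · intro k hk hkn
        rw [hne k (by omega)]
        exact h3 k hk hkn
      · intro k hik hkn hkj
        by_cases hk : k = i + j
        · subst hk
          exact hmid
        · rw [hne k hk]
          exact h4 k hik hkn (by omega)
      · intro k hik hkn hkj
        rw [hne k (by omega)]
        exact h5 k hik hkn (by omega)
    · rw [if_neg hc]
      exact pvAExit _ n i j dp hi hc hlen h3 h4 h5

theorem pvAStep_inv (cs : List Char) (n : Nat) (primes : List String) (t : Nat) (dp : List Int)
    (ht : t < n) (h : pvInvA (pvOk primes cs) n t dp) :
    pvInvA (pvOk primes cs) n (t + 1) (pvAStep cs n primes dp t) := by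
  obtain ⟨hlen, hex, hpart⟩ := h
  simp only [pvAStep]
  set dp1 := (if t + 1 ≤ 6 ∧ primes.contains (String.ofList (cs.take (t + 1))) = true
      then dp.set (t + 1) 1 else dp) with hdp1
  have hlen1 : dp1.length = n + 1 := by
    rw [hdp1]; split_ifs <;> simp [List.length_set, hlen]
  have hne : ∀ k, k ≠ t + 1 → dp1.getD k 0 = dp.getD k 0 := by
    intro k hk
    rw [hdp1]
    split_ifs
    · rw [pvGetD_set _ _ _ _ _ (by omega), if_neg hk]
    · rfl
  have hi1 : dp1.getD (t + 1) 0 = (pvF (pvOk primes cs) (t + 1)).getD 0 := by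
    by_cases hcnd : t + 1 ≤ 6 ∧ primes.contains (String.ofList (cs.take (t + 1))) = true
    · rw [hdp1, if_pos hcnd, pvGetD_set _ _ _ _ _ (by omega), if_pos rfl]
      have hok' : pvOk primes cs 0 (t +  1) = true := hcnd.2
      have hcand : pvCand (pvOk primes cs) (t + 1) 1 :=
        (pvCand_iff_pCand _ _ (by omega) 1).mpr (Or.inr ⟨hcnd.1, hok', rfl⟩)
      rcases hF : pvF (pvOk primes cs) (t + 1) with _ | m
      · rw [pvF_none_iff _ _ (by omega)] at hF
        exact absurd hcand (hF 1)
      · have hs := pvF_some _ _ m (by omega) hF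
        have hmin := hs.2 1 hcand
        have hge := pvCand_ge_one _ _ m hs.1
        simp
        omega
    · rw [hdp1, if_neg hcnd]
      have hmme := hpart (t + 1) (by omega) (by omega)
      apply pvMME_eq_encF _ _ _ (by omega)
      apply pvMME_congr _ _ _ _ hmme
      intro x
      rw [pvCand_iff_pCand _ _ (by omega) x]
      have hts : t + 1 - 1 = t := by omega
      rw [hts]
      constructor
      · exact Or.inl
      · rintro (hx | ⟨h6, hokk, hx⟩)
        · exact hx
        · exact absurd ⟨h6, hokk⟩ hcnd
  by_cases hg : dp1.getD (t + 1) 0 ≠ 0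
  · rw [if_pos hg]
    rcases hF : pvF (pvOk primes cs) (t + 1) with _ | mi
    · rw [hi1, hF] at hg
      simp at hg
    · apply pvAInner_inv cs n primes (t + 1) mi (by omega) (by omega) hF 1 dp1 (le_refl 1) hlen1
      · intro k hk hkn
        by_cases hk1 : k = t + 1
        · rw [hk1, hi1]
        · rw [hne k hk1]
          exact hex k (by omega) hkn
      · intro k hik hkn hkj
        omega
      · intro k hik hkn hkj
        have hts : t + 1 - 1 = t := by omega
        rw [hts, hne k (by omega)]
        exact hpart k (by omega) hkn
  · rw [if_neg hg]
    push Not at hg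
    have hFn : pvF (pvOk primes cs) (t + 1) = none := by
      rcases hF : pvF (pvOk primes cs) (t + 1) with _ | m
      · rfl
      · rw [hi1, hF] at hg
        have := (pvF_pos _ _ m hF).2 (by omega)
        simp at hg
        omega
    refine ⟨hlen1, ?_, ?_⟩
    · intro k hk hkn
      by_cases hk1 : k = t + 1
      · rw [hk1, hi1]
      · rw [hne k hk1]
        exact hex k (by omega) hkn
    · intro k hik hkn
      rw [hne k (by omega)]
      apply pvMME_congr _ _ _ _ (hpart k (by omega) hkn)
      intro x
      rw [pvPCand_succ_iff _ t k x (by omega)]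
      constructor
      · exact Or.inl
      · rintro (hx | ⟨m, _, hFm, _, _⟩)
        · exact hx
        · rw [hFn] at hFm
          cases hFm

theorem pvA_loop (cs : List Char) (n : Nat) (primes : List String) (t : Nat) (ht : t ≤ n) :
    pvInvA (pvOk primes cs) n t
      ((List.range t).foldl (pvAStep cs n primes) (List.replicate (n + 1) (0 : Int))) := by
  induction t with
  | zero =>
    rw [List.range_zero, List.foldl_nil]
    refine ⟨by simp, ?_, ?_⟩
    · intro k hk hkn
      have hk0 : k = 0 := by omega
      subst hk0
      simp [pvF, List.getD_eq_getElem?_getD]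
    · intro k hik hkn
      refine ⟨fun _ x hx => ?_, fun hv => ?_⟩
      · obtain ⟨j, m, _, _, hjk, hkt, _⟩ := hx
        omega
      · exact absurd (by simp [List.getD_eq_getElem?_getD]) hv
  | succ t IH =>
    rw [List.range_succ, List.foldl_append, List.foldl_cons, List.foldl_nil]
    exact pvAStep_inv cs n primes t _ (by omega) (IH (by omega))

-- ===== B-side lemmas: BFS levels compute pvF =====

-- membership in a conditional Set.add fold
theorem pvMemFoldAddIf {α : Type} (l : List α) (P : α → Prop) [DecidablePred P] (f : α → Nat) :
    ∀ (s0 : PySem.Set Nat) (v : Nat),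
      v ∈ l.foldl (fun s x => if P x then PySem.Set.add s (f x) else s) s0 ↔
        v ∈ s0 ∨ ∃ x ∈ l, P x ∧ v = f x := by
  induction l with
  | nil => intro s0 v; simp
  | cons x xs IH =>
    intro s0 v
    rw [List.foldl_cons, IH]
    by_cases hx : P x
    · rw [if_pos hx, PySem.Set.mem_add]
      constructor
      · rintro ((h | h) | h)
        · exact Or.inl h
        · exact Or.inr ⟨x, List.mem_cons_self, hx, h⟩
        · obtain ⟨y, hy, hPy, hv⟩ := h
          exact Or.inr ⟨y, List.mem_cons_of_mem _ hy, hPy, hv⟩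
      · rintro (h | ⟨y, hy, hPy, hv⟩)
        · exact Or.inl (Or.inl h)
        · rcases List.mem_cons.mp hy with rfl | hy'
          · exact Or.inl (Or.inr hv)
          · exact Or.inr ⟨y, hy', hPy, hv⟩
    · rw [if_neg hx]
      constructor
      · rintro (h | ⟨y, hy, hPy, hv⟩)
        · exact Or.inl h
        · exact Or.inr ⟨y, List.mem_cons_of_mem _ hy, hPy, hv⟩
      · rintro (h | ⟨y, hy, hPy, hv⟩)
        · exact Or.inl h
        · rcases List.mem_cons.mp hy with rfl | hy'
          · exact absurd hPy hx
          · exact Or.inr ⟨y, hy', hPy, hv⟩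

-- membership in one BFS level
theorem pvMemNext (cs : List Char) (n : Nat) (primes : List String)
    (visited frontier : PySem.Set Nat) (v : Nat) :
    v ∈ pvBNext cs n primes visited frontier ↔
      ∃ i ∈ frontier, ∃ j0 < 6,
        (i + (j0 + 1) ≤ n ∧ visited.contains (i + (j0 + 1)) = false ∧
         primes.contains (String.ofList ((cs.drop i).take (j0 + 1))) = true) ∧
        v = i + (j0 + 1) := by
  suffices H : ∀ (fr : List Nat) (s0 : PySem.Set Nat),
      v ∈ fr.foldl (fun nxt i =>
        (List.range 6).foldl (fun nxt j0 =>
          if i + (j0 + 1) ≤ n ∧ visited.contains (i + (j0 + 1)) = false ∧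
             primes.contains (String.ofList ((cs.drop i).take (j0 + 1))) = true
          then PySem.Set.add nxt (i + (j0 + 1)) else nxt) nxt) s0 ↔
        v ∈ s0 ∨ ∃ i ∈ fr, ∃ j0 < 6,
          (i + (j0 + 1) ≤ n ∧ visited.contains (i + (j0 + 1)) = false ∧
           primes.contains (String.ofList ((cs.drop i).take (j0 + 1))) = true) ∧
          v = i + (j0 + 1) by
    rw [pvBNext, H]
    simp [PySem.Set.empty]
  intro fr
  induction fr with
  | nil => intro s0; simp
  | cons i₀ rest IH =>
    intro s0
    rw [List.foldl_cons, IH]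
    have hin := pvMemFoldAddIf (List.range 6)
      (fun j0 => i₀ + (j0 + 1) ≤ n ∧ visited.contains (i₀ + (j0 + 1)) = false ∧
        primes.contains (String.ofList ((cs.drop i₀).take (j0 + 1))) = true)
      (fun j0 => i₀ + (j0 + 1)) s0 v
    rw [hin]
    constructor
    · rintro ((h | ⟨j0, hj0, hP, hv⟩) | ⟨i, hi, hrest⟩)
      · exact Or.inl h
      · exact Or.inr ⟨i₀, List.mem_cons_self, j0, List.mem_range.mp hj0, hP, hv⟩
      · exact Or.inr ⟨i, List.mem_cons_of_mem _ hi, hrest⟩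
    · rintro (h | ⟨i, hi, j0, hj0, hP, hv⟩)
      · exact Or.inl (Or.inl h)
      · rcases List.mem_cons.mp hi with rfl | hi'
        · exact Or.inl (Or.inr ⟨j0, List.mem_range.mpr hj0, hP, hv⟩)
        · exact Or.inr ⟨i, hi', j0, hj0, hP, hv⟩

-- descriptions of the visited and frontier sets after k BFS levels
def pvVisEq (ok : Nat → Nat → Bool) (n : Nat) (visited : PySem.Set Nat) (k : Nat) : Prop :=
  ∀ v : Nat, v ∈ visited ↔ v ≤ n ∧ ∃ l : Nat, l ≤ k ∧ pvF ok v = some (l : Int)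

def pvFrontEq (ok : Nat → Nat → Bool) (n : Nat) (frontier : PySem.Set Nat) (k : Nat) : Prop :=
  ∀ v : Nat, v ∈ frontier ↔ v ≤ n ∧ pvF ok v = some (k : Int)

-- one BFS level reaches exactly the positions whose minimal piece count is k+1
set_option maxRecDepth 4096 in
theorem pvNext_char (cs : List Char) (n : Nat) (visited frontier : PySem.Set Nat) (k : Nat)
    (hv : pvVisEq (pvOk getPrimesFromSeive cs) n visited k)
    (hf : pvFrontEq (pvOk getPrimesFromSeive cs) n frontier k) :
    pvFrontEq (pvOk getPrimesFromSeive cs) n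
      (pvBNext cs n getPrimesFromSeive visited frontier) (k + 1) := by
  intro v
  rw [pvMemNext]
  constructor
  · rintro ⟨i, hi, j0, hj0, ⟨hle, hvis, hprime⟩, hveq⟩
    rw [← hveq] at hle hvis
    obtain ⟨hin, hFi⟩ := (hf i).mp hi
    have hok : pvOk getPrimesFromSeive cs i (j0 + 1) = true := hprime
    have hcand : pvCand (pvOk getPrimesFromSeive cs) v ((k : Int) + 1) := by
      refine ⟨j0 + 1, (k : Int), by omega, by omega, by omega, ?_, ?_, by omega⟩
      · have h : v - (j0 + 1) = i := by omega
        rw [h]; exact hFi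
      · have h : v - (j0 + 1) = i := by omega
        rw [h]; exact hok
    have hnvis : v ∉ visited := by
      intro hmem
      have hct := (PySem.Set.contains_iff visited v).mpr hmem
      rw [hvis] at hct
      cases hct
    refine ⟨hle, ?_⟩
    rcases hFv : pvF (pvOk getPrimesFromSeive cs) v with _ | m
    · rw [pvF_none_iff _ _ (by omega)] at hFv
      exact absurd hcand (hFv _)
    · have hs := pvF_some _ _ m (by omega) hFv
      have hub : m ≤ (k : Int) + 1 := hs.2 _ hcand
      have hnn : 0 ≤ m := (pvF_pos _ _ m hFv).1
      have hlb : ¬ (m ≤ (k : Int)) := by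
        intro hm
        apply hnvis
        rw [hv v]
        refine ⟨hle, m.toNat, by omega, ?_⟩
        have hc1 : ((m.toNat : Nat) : Int) = m := by omega
        rw [hFv, hc1]
      have hc2 : ((k + 1 : Nat) : Int) = m := by push_cast; omega
      rw [hc2]
  · rintro ⟨hle, hFv⟩
    have hv1 : 1 ≤ v := by
      rcases Nat.eq_zero_or_pos v with rfl | h
      · exfalso
        rw [pvF_zero] at hFv
        have h0 := Option.some.inj hFv
        omega
      · exact h
    obtain ⟨hcand, _⟩ := pvF_some _ _ _ hv1 hFv
    obtain ⟨j, m, hj1, hj6, hjv, hFi, hok, hm⟩ := hcand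
    have hmk : m = (k : Int) := by push_cast at hm; omega
    refine ⟨v - j, ?_, j - 1, by omega, ⟨?_, ?_, ?_⟩, by omega⟩
    · rw [hf (v - j)]
      exact ⟨by omega, by rw [hFi, hmk]⟩
    · omega
    · rw [Bool.eq_false_iff]
      intro hcv
      rw [PySem.Set.contains_iff] at hcv
      have hjj : v - j + (j - 1 + 1) = v := by omega
      rw [hjj] at hcv
      obtain ⟨_, l, hlk, hFl⟩ := (hv v).mp hcv
      rw [hFv] at hFl
      have h1 := Option.some.inj hFl
      omega
    · have hjj : j - 1 + 1 = j := by omega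
      rw [hjj]
      exact hok

-- the BFS loop returns A's 0-sentinel encoding of pvF n
theorem pvBLoop_eq (cs : List Char) (n : Nat) :
    ∀ (t k : Nat) (visited frontier : PySem.Set Nat),
      n + 1 - k ≤ t → 1 ≤ k →
      pvVisEq (pvOk getPrimesFromSeive cs) n visited (k - 1) →
      pvFrontEq (pvOk getPrimesFromSeive cs) n frontier (k - 1) →
      (∀ l : Nat, l < k → pvF (pvOk getPrimesFromSeive cs) n ≠ some (l : Int)) →
      pvBLoop cs n getPrimesFromSeive visited frontier k =
        (pvF (pvOk getPrimesFromSeive cs) n).getD 0 := by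
  intro t
  induction t with
  | zero =>
    intro k visited frontier ht hk hv hf hno
    rw [pvBLoop, dif_neg (by omega)]
    rcases hF : pvF (pvOk getPrimesFromSeive cs) n with _ | m
    · rfl
    · have h0 : 0 ≤ m := (pvF_pos _ _ m hF).1
      have h1 : m ≤ (n : Int) := pvF_le _ _ m hF
      exact absurd (by rw [hF]; congr 1; omega) (hno m.toNat (by omega))
  | succ t IH =>
    intro k visited frontier ht hk hv hf hno
    by_cases hkn : k ≤ n
    · rw [pvBLoop, dif_pos hkn]
      have hchar : pvFrontEq (pvOk getPrimesFromSeive cs) n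
          (pvBNext cs n getPrimesFromSeive visited frontier) ((k - 1) + 1) :=
        pvNext_char cs n visited frontier (k - 1) hv hf
      have hk1 : k - 1 + 1 = k := by omega
      rw [hk1] at hchar
      by_cases hcn : (pvBNext cs n getPrimesFromSeive visited frontier).contains n = true
      · simp only [hcn, if_pos]
        rw [PySem.Set.contains_iff] at hcn
        obtain ⟨_, hFn⟩ := (hchar n).mp hcn
        rw [hFn]
        rfl
      · rw [Bool.not_eq_true] at hcn
        simp only [hcn, Bool.false_eq_true, if_false]
        apply IH (k + 1) _ _ (by omega) (by omega)
        · intro v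
          rw [PySem.Set.mem_union]
          have hkk : k + 1 - 1 = k := by omega
          rw [hkk, hv v, hchar v]
          constructor
          · rintro (⟨hvn, l, hl, hFl⟩ | ⟨hvn, hFv⟩)
            · exact ⟨hvn, l, by omega, hFl⟩
            · exact ⟨hvn, k, le_refl _, hFv⟩
          · rintro ⟨hvn, l, hl, hFl⟩
            by_cases hlk : l ≤ k - 1
            · exact Or.inl ⟨hvn, l, hlk, hFl⟩
            · have : l = k := by omega
              subst this
              exact Or.inr ⟨hvn, hFl⟩
        · intro v
          have hkk : k + 1 - 1 = k := by omega
          rw [hkk]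
          exact hchar v
        · intro l hl
          by_cases hlk : l < k
          · exact hno l hlk
          · have hlk' : l = k := by omega
            subst hlk'
            intro hFn
            have hct : (pvBNext cs n getPrimesFromSeive visited frontier).contains n = true := by
              rw [PySem.Set.contains_iff]
              exact (hchar n).mpr ⟨le_refl _, hFn⟩
            rw [hcn] at hct
            cases hct
    · rw [pvBLoop, dif_neg hkn]
      rcases hF : pvF (pvOk getPrimesFromSeive cs) n with _ | m
      · rfl
      · have h0 : 0 ≤ m := (pvF_pos _ _ m hF).1
        have h1 : m ≤ (n : Int) := pvF_le _ _ m hF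
        exact absurd (by rw [hF]; congr 1; omega) (hno m.toNat (by omega))

theorem pvMain (number : String) : splitIntoPrimes number = splitIntoPrimes_alt number := by
  simp only [splitIntoPrimes, splitIntoPrimes_alt]
  obtain ⟨_, hAex, _⟩ := pvA_loop number.toList number.toList.length getPrimesFromSeive
    number.toList.length (le_refl _)
  rw [hAex _ (le_refl _) (le_refl _)]
  by_cases hn : number.toList.length = 0
  · rw [hn, pvF_zero, pvBLoop, dif_neg (by omega)]
    rfl
  · rw [pvBLoop_eq number.toList number.toList.length number.toList.length 1
      (PySem.Set.ofList [0]) (PySem.Set.ofList [0]) (by omega) (le_refl _) ?hv ?hf ?hno]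
    case hv =>
      intro v
      constructor
      · intro hmem
        have hv0 : v = 0 := by
          simpa [PySem.Set.mem_ofList] using hmem
        subst hv0
        exact ⟨by omega, 0, le_refl _, pvF_zero _⟩
      · rintro ⟨hvn, l, hl, hFl⟩
        have hl0 : l = 0 := by omega
        subst hl0
        have hv0 : v = 0 := by
          by_contra hv0
          have := (pvF_pos _ v _ hFl).2 (by omega)
          omega
        subst hv0
        simp [PySem.Set.mem_ofList]
    case hf =>
      intro v
      constructor
      · intro hmem
        have hv0 : v = 0 := by
          simpa [PySem.Set.mem_ofList] using hmem
        subst hv0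
        exact ⟨by omega, by rw [pvF_zero]; rfl⟩
      · rintro ⟨hvn, hFv⟩
        have hv0 : v = 0 := by
          by_contra hv0
          have := (pvF_pos _ v _ hFv).2 (by omega)
          simp at this
        subst hv0
        simp [PySem.Set.mem_ofList]
    case hno =>
      intro l hl
      have hl0 : l = 0 := by omega
      subst hl0
      intro hFn
      have := (pvF_pos _ _ _ hFn).2 (by omega)
      simp at this

-- ===== VERDICT (by name: the statement is the Claim_ definition above) =====
theorem splitIntoPrimes_spec : Claim_equal_splitIntoPrimes := by
  intro number _
  show splitIntoPrimes number = splitIntoPrimes_alt number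
  exact pvMain number
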